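-- pv_equiv track=rewrite | github.com/weiazm/crawler | src/user/statisticForUser.py | getReplyOthers
-- ===== SOURCE A (Python) =====
-- def getReplyOthers(contents):
--     result = 0
--     bbs_id_list = []
--     for content in contents:
--         if content[4] == 0:
--             bbs_id_list.append(content[2])
--     bbs_id_list = set(bbs_id_list)
--     for content in contents:
--         if content[4] != 0:
--             if content[2] not in bbs_id_list:
--                 result += 1
--     return result
-- ===== SOURCE B (Python) =====
-- def getReplyOthers(contents):
--     groups = {}
--     for content in contents:
--         has_root, replies = groups.get(content[2], (False, 0))
--         if content[4] == 0:
--             has_root = True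
--         else:
--             replies += 1
--         groups[content[2]] = (has_root, replies)
--     return sum(r for hr, r in groups.values() if not hr)
-- ===== Notes on version B (the rewrite author's own statement) =====
-- stated objective: alternative
-- what changed: Replaces the root-id-set build plus a second scan of contents with a single grouping pass that folds per-bbs_id (has_root, reply_count) aggregates into a dict, then sums reply_count over the groups without a root.
import Mathlib
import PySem

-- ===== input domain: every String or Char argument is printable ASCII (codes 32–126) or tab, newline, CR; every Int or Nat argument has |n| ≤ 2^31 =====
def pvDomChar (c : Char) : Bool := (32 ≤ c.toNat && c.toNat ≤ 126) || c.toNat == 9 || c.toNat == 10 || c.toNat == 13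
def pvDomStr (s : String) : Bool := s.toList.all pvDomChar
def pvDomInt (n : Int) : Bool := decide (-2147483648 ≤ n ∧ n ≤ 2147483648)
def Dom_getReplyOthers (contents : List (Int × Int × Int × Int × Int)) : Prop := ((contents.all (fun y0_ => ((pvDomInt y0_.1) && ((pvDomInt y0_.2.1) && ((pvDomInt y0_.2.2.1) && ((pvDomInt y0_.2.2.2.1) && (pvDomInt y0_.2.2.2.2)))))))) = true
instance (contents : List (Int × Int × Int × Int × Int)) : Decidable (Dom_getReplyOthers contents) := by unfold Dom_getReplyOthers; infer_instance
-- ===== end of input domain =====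

-- B replaces A's root-id-set build plus second scan of contents by a single grouping
-- pass into a dict of per-bbs_id (has_root, reply_count) aggregates, then sums the
-- reply counts of the rootless groups (alternative decomposition, same cost).

-- ===== PORT A =====
def getReplyOthers (contents : List (Int × Int × Int × Int × Int)) : Int :=
  let result : Int := 0
  let bbs_id_list : List Int :=
    contents.foldl (fun acc content =>
      if content.2.2.2.2 == 0 then acc ++ [content.2.2.1] else acc) []
  let bbs_id_set : PySem.Set Int := PySem.Set.ofList bbs_id_list
  contents.foldl (fun result content =>
    if content.2.2.2.2 != 0 then
      if !(PySem.Set.contains bbs_id_set content.2.2.1) then result + 1 else result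
    else result) result

-- ===== PORT B =====
def getReplyOthers_alt (contents : List (Int × Int × Int × Int × Int)) : Int :=
  let groups : PySem.Dict Int (Bool × Int) :=
    contents.foldl (fun d content =>
      d.insert content.2.2.1
        (if content.2.2.2.2 == 0 then
          (true, (d.getD content.2.2.1 (false, 0)).2)
        else
          ((d.getD content.2.2.1 (false, 0)).1,
           (d.getD content.2.2.1 (false, 0)).2 + 1))) PySem.Dict.empty
  (groups.values.filter (fun p => !p.1)).foldl (fun acc p => acc + p.2) 0

-- ===== PRECONDITION & SPEC =====
def Spec_getReplyOthers (contents : List (Int × Int × Int × Int × Int)) (out : Int) : Prop := out = getReplyOthers_alt contents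
instance (contents : List (Int × Int × Int × Int × Int)) (out : Int) : Decidable (Spec_getReplyOthers contents out) := by unfold Spec_getReplyOthers; infer_instance

-- ===== CLAIM (what is proved, stated in full; the proofs are below) =====
def Claim_equal_getReplyOthers : Prop := ∀ (contents : List (Int × Int × Int × Int × Int)), Dom_getReplyOthers contents → Spec_getReplyOthers contents (getReplyOthers contents)

-- ===== LEMMAS AND PROOFS =====

-- shorthand: the bbs_id and the "is a root post" test of one record
def pvId (c : Int × Int × Int × Int × Int) : Int := c.2.2.1
def pvIsRoot (c : Int × Int × Int × Int × Int) : Bool := c.2.2.2.2 == 0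
-- whether some record of l with bbs_id k is a root, and how many records of l with bbs_id k are replies
def pvHasRoot (k : Int) (l : List (Int × Int × Int × Int × Int)) : Bool :=
  l.any (fun c => pvId c == k && pvIsRoot c)
def pvRepl (k : Int) (l : List (Int × Int × Int × Int × Int)) : Nat :=
  l.countP (fun c => pvId c == k && !pvIsRoot c)
-- B's grouping step (definitionally the fold body of getReplyOthers_alt)
def pvStep (d : PySem.Dict Int (Bool × Int)) (content : Int × Int × Int × Int × Int) :
    PySem.Dict Int (Bool × Int) :=
  d.insert content.2.2.1
    (if content.2.2.2.2 == 0 then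
      (true, (d.getD content.2.2.1 (false, 0)).2)
    else
      ((d.getD content.2.2.1 (false, 0)).1,
       (d.getD content.2.2.1 (false, 0)).2 + 1))

-- the aggregate B's grouping fold stores under key k
lemma pvGetD_fold (l : List (Int × Int × Int × Int × Int)) :
    ∀ (d : PySem.Dict Int (Bool × Int)) (k : Int),
      (l.foldl pvStep d).getD k (false, 0)
        = ((d.getD k (false, 0)).1 || pvHasRoot k l,
           (d.getD k (false, 0)).2 + (pvRepl k l : Int)) := by
  induction l with
  | nil => intro d k; simp [pvHasRoot, pvRepl]
  | cons c l ih =>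
    intro d k
    rw [List.foldl_cons, ih]
    have hstep : (pvStep d c).getD k (false, 0)
        = if k = c.2.2.1 then
            (if c.2.2.2.2 == 0 then
              (true, (d.getD c.2.2.1 (false, 0)).2)
            else
              ((d.getD c.2.2.1 (false, 0)).1,
               (d.getD c.2.2.1 (false, 0)).2 + 1))
          else d.getD k (false, 0) := by
      simp [pvStep, PySem.Dict.getD_insert]
    rw [hstep]
    by_cases hk : k = c.2.2.1
    · by_cases hr : c.2.2.2.2 == 0 <;>
        simp [hk, hr, pvHasRoot, pvRepl, pvId, pvIsRoot, List.countP_cons] <;> ring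
    · have hk' : (c.2.2.1 == k) = false := by simp [Ne.symm hk]
      by_cases hr : c.2.2.2.2 == 0 <;>
        simp [hk, hk', hr, pvHasRoot, pvRepl, pvId, pvIsRoot]

-- the keys of B's grouping dict are the distinct bbs_ids in first-occurrence order
lemma pvKeys_fold (l : List (Int × Int × Int × Int × Int)) :
    (l.foldl pvStep PySem.Dict.empty).keys = PySem.Set.ofList (l.map pvId) := by
  have h := PySem.Dict.keys_foldl_insert_key (l := l) (key := fun c => c.2.2.1)
      (f := fun d content =>
        (if content.2.2.2.2 == 0 then
          (true, (d.getD content.2.2.1 (false, (0:Int))).2)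
        else
          ((d.getD content.2.2.1 (false, 0)).1,
           (d.getD content.2.2.1 (false, 0)).2 + 1)))
      (d := PySem.Dict.empty)
  rw [PySem.Dict.keys_empty, PySem.Set.update_nil_left] at h
  exact h

-- per-key counting identity: summing, over the distinct keys satisfying Q, the number of
-- records with that key satisfying R counts the records satisfying both Q-of-key and R
lemma pvSum_per_key {α : Type} (K : List Int) (hK : K.Nodup) (Q : Int → Bool)
    (R : α → Bool) (id : α → Int) :
    ∀ cs : List α, (∀ c ∈ cs, id c ∈ K) →
      ((K.filter Q).map (fun k => (cs.countP (fun c => id c == k && R c) : Int))).sum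
        = (cs.countP (fun c => Q (id c) && R c) : Int) := by
  intro cs
  induction cs with
  | nil => intro _; simp
  | cons c cs ih =>
    intro hmem
    have hc : id c ∈ K := hmem c (List.mem_cons_self ..)
    have hrest : ∀ x ∈ cs, id x ∈ K := fun x hx => hmem x (List.mem_cons_of_mem _ hx)
    have hsplit : ((K.filter Q).map
          (fun k => (((c :: cs).countP (fun x => id x == k && R x) : Nat) : Int))).sum
        = ((K.filter Q).map (fun k => (cs.countP (fun x => id x == k && R x) : Int))).sum
          + ((K.filter Q).map (fun k => if id c == k && R c then (1 : Int) else 0)).sum := by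
      rw [← PySem.List.sum_map_add_int]
      apply congrArg
      apply List.map_congr_left
      intro k _
      by_cases h : (id c == k && R c) = true <;> simp [List.countP_cons, h] <;> push_cast <;> ring
    rw [hsplit, ih hrest]
    have hdelta : ((K.filter Q).map (fun k => if id c == k && R c then (1 : Int) else 0)).sum
        = if Q (id c) && R c then (1 : Int) else 0 := by
      by_cases hR : R c = true
      · simp only [hR, Bool.and_true]
        rw [PySem.List.sum_map_ite_one_zero]
        have hcnt : (K.filter Q).countP (fun k => id c == k) = (K.filter Q).count (id c) := by
          unfold List.count
          apply List.countP_congr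
          intro k hk
          beta_reduce
          rw [Bool.beq_comm (a := id c) (b := k)]
        rw [hcnt]
        by_cases hQ : Q (id c) = true
        · have hm : id c ∈ K.filter Q := List.mem_filter.2 ⟨hc, hQ⟩
          rw [List.count_eq_one_of_mem (hK.filter _) hm]
          simp [hQ]
        · have hm : id c ∉ K.filter Q := fun h => hQ (List.mem_filter.1 h).2
          rw [List.count_eq_zero_of_not_mem hm]
          simp [hQ]
      · simp [hR, Bool.and_false]
    rw [hdelta]
    rw [List.countP_cons]
    by_cases h : (Q (id c) && R c) = true <;> simp [h] <;> push_cast <;> ring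

-- A's counting loop with its two nested tests is a countP of the conjunction
lemma pvFoldCount {α : Type} (P Q : α → Bool) (l : List α) :
    ∀ init : Int,
      l.foldl (fun r c => if P c then (if Q c then r + 1 else r) else r) init
        = init + (l.countP (fun c => P c && Q c) : Int) := by
  induction l with
  | nil => intro init; simp
  | cons c l ih =>
    intro init
    rw [List.foldl_cons, List.countP_cons]
    by_cases hP : P c = true <;> by_cases hQ : Q c = true <;>
      simp [hP, hQ, ih] <;> push_cast <;> ring

-- membership in A's root-id set is B's per-key has_root flag
lemma pvContains_eq (contents : List (Int × Int × Int × Int × Int)) (x : Int) :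
    PySem.Set.contains
        (PySem.Set.ofList
          ((contents.filter (fun c => c.2.2.2.2 == 0)).map (fun c => c.2.2.1))) x
      = pvHasRoot x contents := by
  rw [Bool.eq_iff_iff]
  simp only [PySem.Set.contains_iff, PySem.Set.mem_ofList, List.mem_map, List.mem_filter,
    pvHasRoot, List.any_eq_true, pvId, pvIsRoot, Bool.and_eq_true, beq_iff_eq]
  constructor
  · rintro ⟨c, ⟨hc, hr⟩, hx⟩
    exact ⟨c, hc, hx, hr⟩
  · rintro ⟨c, hc, hx, hr⟩
    exact ⟨c, ⟨hc, hr⟩, hx⟩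

-- ===== VERDICT (by name: the statement is the Claim_ definition above) =====
theorem getReplyOthers_spec : Claim_equal_getReplyOthers := by
  intro contents _
  unfold Spec_getReplyOthers
  show getReplyOthers contents = getReplyOthers_alt contents
  have hB : getReplyOthers_alt contents
      = ((contents.foldl pvStep PySem.Dict.empty).values.filter (fun p => !p.1)).foldl
          (fun acc p => acc + p.2) 0 := rfl
  have hA : getReplyOthers contents
      = contents.foldl (fun r c =>
          if c.2.2.2.2 != 0 then
            if !(PySem.Set.contains
                  (PySem.Set.ofList
                    (contents.foldl (fun acc c =>
                      if c.2.2.2.2 == 0 then acc ++ [c.2.2.1] else acc) []))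
                  c.2.2.1) then r + 1 else r
          else r) 0 := rfl
  rw [hA, hB]
  -- A's side: the appending loop is a filter-map, the counting loop a countP
  rw [PySem.List.foldl_append_if] at *
  rw [pvFoldCount]
  simp only [List.nil_append, zero_add]
  -- B's side: expose the grouped table as a map over the distinct keys
  have hkeys := pvKeys_fold contents
  have hnd : (contents.foldl pvStep PySem.Dict.empty).keys.Nodup := by
    rw [hkeys]; exact PySem.Set.nodup_ofList _
  rw [PySem.Dict.values_eq_map_keys _ hnd (false, 0), hkeys]
  have hgetD : ∀ k : Int,
      (contents.foldl pvStep PySem.Dict.empty).getD k (false, 0)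
        = (pvHasRoot k contents, (pvRepl k contents : Int)) := by
    intro k
    rw [pvGetD_fold contents PySem.Dict.empty k]
    simp
  simp only [hgetD]
  rw [List.filter_map]
  rw [PySem.List.foldl_add (g := fun p : Bool × Int => p.2)]
  simp only [zero_add, List.map_map]
  have hsum := pvSum_per_key (PySem.Set.ofList (contents.map pvId))
      (PySem.Set.nodup_ofList _) (fun k => !pvHasRoot k contents)
      (fun c => !pvIsRoot c) pvId contents
      (fun c hc => (PySem.Set.mem_ofList _ _).2 (List.mem_map_of_mem hc))
  have hLHS : (contents.countP fun c =>
        (c.2.2.2.2 != 0) &&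
          !(PySem.Set.contains
              (PySem.Set.ofList
                ((contents.filter (fun c => c.2.2.2.2 == 0)).map (fun c => c.2.2.1)))
              c.2.2.1))
      = contents.countP (fun c => (!pvHasRoot (pvId c) contents) && !pvIsRoot c) := by
    apply List.countP_congr
    intro c hc
    beta_reduce
    rw [pvContains_eq contents c.2.2.1]
    simp [pvId, pvIsRoot, Bool.and_comm]
  rw [hLHS, ← hsum]
  apply congrArg
  apply List.map_congr_left
  intro k hk
  rfl
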